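-- pv_equiv track=rewrite | github.com/airdrum/DataAnalysis | main/main.py | getNoneElementsOneArray
-- ===== SOURCE A (Python) =====
-- def getNoneElementsOneArray(fso):
--     counter=0
--     none_counter=0
--     index_list = []
--     last_remaining_index_old = 0
--     while counter < len(fso):
--         if fso[counter]==None:
--
--             none_counter +=1
--             if none_counter ==1:
--                 last_remaining_index_old = counter
--         else:
--             if none_counter >1:
--                 index_list.append([last_remaining_index_old,none_counter])
--             none_counter=0
--         counter+=1
--     return index_list
-- ===== SOURCE B (Python) =====
-- def getNoneElementsOneArray(fso):
--     # Indices whose element is not None (same == semantics as A).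
--     boundaries = [i for i, x in enumerate(fso) if not (x == None)]
--     result = []
--     prev = -1
--     for i in boundaries:
--         run_len = i - prev - 1
--         if run_len > 1:
--             result.append([prev + 1, run_len])
--         prev = i
--     return result
-- ===== Notes on version B (the rewrite author's own statement) =====
-- stated objective: alternative
-- what changed: Replaces A's stateful counter/flag scan with a two-phase gap computation: first collect the indices of non-None elements, then emit [prev+1, gap] for each gap > 1 between consecutive such indices (starting from -1), which reproduces A's dropping of a trailing None run without any run-length counter.
import Mathlib
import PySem

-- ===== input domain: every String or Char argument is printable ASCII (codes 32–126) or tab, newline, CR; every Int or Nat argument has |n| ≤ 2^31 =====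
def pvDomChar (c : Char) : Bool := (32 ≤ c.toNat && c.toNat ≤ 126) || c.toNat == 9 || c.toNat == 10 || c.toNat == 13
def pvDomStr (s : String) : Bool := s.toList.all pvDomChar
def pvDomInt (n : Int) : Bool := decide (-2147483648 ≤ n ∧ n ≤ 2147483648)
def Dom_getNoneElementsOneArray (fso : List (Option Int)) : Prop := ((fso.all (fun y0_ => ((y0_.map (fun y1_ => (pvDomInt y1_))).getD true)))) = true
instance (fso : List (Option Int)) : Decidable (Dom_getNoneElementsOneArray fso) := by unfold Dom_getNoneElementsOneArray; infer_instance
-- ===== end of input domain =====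

-- B is an alternative decomposition (boundary indices + gaps) of A's run-length scan; return values proved equal on all inputs.

-- ===== PORT A =====
-- while loop over counter, carrying (none_counter, last_remaining_index_old, index_list)
def pvALoop : List (Option Int) → Int → Int → Int → List (List Int) → List (List Int)
  | [], _, _, _, indexList => indexList
  | x :: rest, counter, noneCounter, lastIdx, indexList =>
    if x == none then
      pvALoop rest (counter + 1) (noneCounter + 1)
        (if noneCounter + 1 == 1 then counter else lastIdx) indexList
    else
      pvALoop rest (counter + 1) 0 lastIdx
        (if noneCounter > 1 then indexList ++ [[lastIdx, noneCounter]] else indexList)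

def getNoneElementsOneArray (fso : List (Option Int)) : List (List Int) :=
  pvALoop fso 0 0 0 []

-- ===== PORT B =====
-- indices of non-None elements
def pvBoundaries (fso : List (Option Int)) : List Int :=
  (PySem.List.enumerate fso).filterMap (fun p => if ¬(p.2 == none) then some p.1 else none)

-- for loop over boundaries, carrying (prev, result)
def pvBLoop : List Int → Int → List (List Int) → List (List Int)
  | [], _, result => result
  | i :: rest, prev, result =>
    pvBLoop rest i (if i - prev - 1 > 1 then result ++ [[prev + 1, i - prev - 1]] else result)

def getNoneElementsOneArray_alt (fso : List (Option Int)) : List (List Int) :=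
  pvBLoop (pvBoundaries fso) (-1) []

-- ===== PRECONDITION & SPEC =====
def Spec_getNoneElementsOneArray (fso : List (Option Int)) (out : List (List Int)) : Prop := out = getNoneElementsOneArray_alt fso
instance (fso : List (Option Int)) (out : List (List Int)) : Decidable (Spec_getNoneElementsOneArray fso out) := by unfold Spec_getNoneElementsOneArray; infer_instance

-- ===== CLAIM (what is proved, stated in full; the proofs are below) =====
def Claim_equal_getNoneElementsOneArray : Prop := ∀ (fso : List (Option Int)), Dom_getNoneElementsOneArray fso → Spec_getNoneElementsOneArray fso (getNoneElementsOneArray fso)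

-- ===== LEMMAS AND PROOFS =====
-- non-None indices of xs, with indices offset by s (recursion-friendly form of pvBoundaries)
def pvBnd : List (Option Int) → Int → List Int
  | [], _ => []
  | none :: rest, s => pvBnd rest (s + 1)
  | some _ :: rest, s => s :: pvBnd rest (s + 1)

theorem pvBoundaries_eq_bnd (xs : List (Option Int)) (s : Int) :
    (PySem.List.enumerate xs s).filterMap (fun p => if ¬(p.2 == none) then some p.1 else none)
      = pvBnd xs s := by
  induction xs generalizing s with
  | nil => simp [pvBnd, PySem.List.enumerate_nil]
  | cons x rest ih =>
    rw [PySem.List.enumerate_cons, List.filterMap_cons]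
    cases x with
    | none => exact ih (s + 1)
    | some v => exact congrArg (fun l => s :: l) (ih (s + 1))

theorem pvLoop_eq (xs : List (Option Int)) :
    ∀ (c nc lastIdx prev : Int) (acc : List (List Int)),
    (nc = 0 → prev = c - 1) → (1 ≤ nc → prev = lastIdx - 1 ∧ nc = c - lastIdx) →
    (nc = 0 ∨ 1 ≤ nc) →
    pvALoop xs c nc lastIdx acc = pvBLoop (pvBnd xs c) prev acc := by
  induction xs with
  | nil => intro _ _ _ _ _ _ _ _; simp [pvALoop, pvBnd, pvBLoop]
  | cons x rest ih =>
    intro c nc lastIdx prev acc h0 h1 hcase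
    cases x with
    | none =>
      rcases hcase with h | h
      · subst h
        have e1 : ((none : Option Int) == none) = true := rfl
        have e2 : ((0 : Int) + 1 == 1) = true := by decide
        simp only [pvALoop, pvBnd, e1, if_true, e2]
        have hp := h0 rfl
        exact ih (c + 1) 1 c prev acc (by omega) (fun _ => ⟨by omega, by omega⟩) (Or.inr (by omega))
      · obtain ⟨hp, hn⟩ := h1 h
        have e1 : ((none : Option Int) == none) = true := rfl
        have e2 : (nc + 1 == 1) = false := by simp; omega
        simp only [pvALoop, pvBnd, e1, if_true, e2, Bool.false_eq_true, if_false]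
        exact ih (c + 1) (nc + 1) lastIdx prev acc (by omega) (fun _ => ⟨hp, by omega⟩) (Or.inr (by omega))
    | some v =>
      have hx : ((some v : Option Int) == none) = false := by simp
      rcases hcase with h | h
      · subst h
        have hp := h0 rfl
        simp only [pvALoop, pvBnd, hx, Bool.false_eq_true, if_false, pvBLoop]
        have hrun : c - prev - 1 = 0 := by omega
        rw [hrun]
        rw [if_neg (by omega : ¬((0:Int) > 1)), if_neg (by omega : ¬((0:Int) > 1))]
        exact ih (c + 1) 0 lastIdx c acc (fun _ => by omega) (fun hh => by omega) (Or.inl rfl)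
      · obtain ⟨hp, hn⟩ := h1 h
        simp only [pvALoop, pvBnd, hx, Bool.false_eq_true, if_false, pvBLoop]
        have hrun : c - prev - 1 = nc := by omega
        rw [hrun]
        have hstart : prev + 1 = lastIdx := by omega
        rw [hstart]
        exact ih (c + 1) 0 lastIdx c _ (fun _ => by omega) (fun hh => by omega) (Or.inl rfl)

-- ===== VERDICT (by name: the statement is the Claim_ definition above) =====
theorem getNoneElementsOneArray_spec : Claim_equal_getNoneElementsOneArray := by
  intro fso _
  unfold Spec_getNoneElementsOneArray getNoneElementsOneArray getNoneElementsOneArray_alt pvBoundaries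
  rw [pvBoundaries_eq_bnd]
  exact pvLoop_eq fso 0 0 0 (-1) [] (fun _ => by omega) (fun h => by omega) (Or.inl rfl)
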